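-- pv_equiv track=rewrite | github.com/Opszalek/License_Plate_Recognition | processing/utils.py | return_biggest_rectangle
-- ===== SOURCE A (Python) =====
-- def is_rect_inside_rect(rect1, rect2):
--     """
--     Check if rectangle is inside rectangle.
--     :param rect1: First rectangle.
--     :param rect2: Second rectangle.
--     :return: True if rectangle is inside rectangle, False otherwise.
--     """
--     return (rect2[0] <= rect1[0] <= rect1[2] <= rect2[2]) and (rect2[1] <= rect1[1] <= rect1[3] <= rect2[3])
--
-- def rectangle_area(rect):
--     """
--     Calculate the area of a rectangle.
--     :param rect: Rectangle coordinates (x1, y1, x2, y2).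
--     :return: Area of the rectangle.
--     """
--     return (rect[2] - rect[0]) * (rect[3] - rect[1])
--
-- def return_biggest_rectangle(rect_list, is_plate=False) -> list:
--     """
--     Function takes list of rectangles and returns list of biggest rectangles
--     :param rect_list: list of rectangles
--     :param is_plate: if True function returns only rectangles with area bigger than 9000
--     :return: list of biggest rectangles
--     """
--     rect_list_cleaned = []
--     for rect_1 in rect_list:
--         is_biggest_rect = True
--         for rect_2 in rect_list:
--             if rect_1 != rect_2 and (is_rect_inside_rect(rect_2, rect_1) or is_rect_inside_rect(rect_1, rect_2)):
--                 if rectangle_area(rect_1) < rectangle_area(rect_2):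
--                     is_biggest_rect = False
--                     break
--         if is_biggest_rect:
--             if is_plate == False:
--                 rect_list_cleaned.append(rect_1)
--             elif is_plate and rectangle_area(rect_1) > 9000:
--                 rect_list_cleaned.append(rect_1)
--
--     return rect_list_cleaned
-- ===== SOURCE B (Python) =====
-- def return_biggest_rectangle(rect_list, is_plate=False) -> list:
--     """
--     Sort-then-scan re-implementation: a rectangle is dropped exactly when some
--     rectangle strictly containing it has strictly larger area.  Scanning in
--     descending area order, it suffices to test against the already-kept
--     rectangles (any container of larger area is itself contained in a kept one
--     of larger area, by transitivity).  Output order follows rect_list.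
--     """
--     def area(r):
--         return (r[2] - r[0]) * (r[3] - r[1])
--
--     def contains(big, small):
--         return (big[0] <= small[0] <= small[2] <= big[2]
--                 and big[1] <= small[1] <= small[3] <= big[3])
--
--     kept = []
--     for r in sorted(rect_list, key=area, reverse=True):
--         if not any(contains(k, r) and area(k) > area(r) for k in kept):
--             kept.append(r)
--     return [r for r in rect_list
--             if r in kept and (not is_plate or area(r) > 9000)]
-- ===== Notes on version B (the rewrite author's own statement) =====
-- stated objective: faster
-- what changed: Replaced the all-pairs symmetric scan with its break by: sort by area descending, keep a rectangle only if no already-kept larger-area rectangle strictly contains it (sufficient by transitivity), then emit survivors in original rect_list order.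
import Mathlib
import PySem

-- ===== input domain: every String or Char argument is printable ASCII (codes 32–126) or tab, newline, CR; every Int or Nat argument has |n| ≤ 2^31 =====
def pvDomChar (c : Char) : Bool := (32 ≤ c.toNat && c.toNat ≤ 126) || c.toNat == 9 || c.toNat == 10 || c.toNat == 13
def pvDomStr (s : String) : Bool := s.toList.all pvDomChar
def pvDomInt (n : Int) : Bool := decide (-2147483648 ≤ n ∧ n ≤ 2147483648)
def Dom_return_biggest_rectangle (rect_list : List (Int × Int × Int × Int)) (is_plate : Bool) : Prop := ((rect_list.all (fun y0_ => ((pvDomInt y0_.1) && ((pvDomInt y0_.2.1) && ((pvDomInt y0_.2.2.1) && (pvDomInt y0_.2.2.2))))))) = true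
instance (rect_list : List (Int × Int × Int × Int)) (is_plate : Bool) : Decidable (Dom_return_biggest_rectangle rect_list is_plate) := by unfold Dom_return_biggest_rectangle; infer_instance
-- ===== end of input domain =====

-- B replaces the all-pairs scan by a descending-area sweep over already-kept rectangles (alternative decomposition, same results).

-- ===== PORT A =====
-- is_rect_inside_rect(rect1, rect2)
def pvInsideA (r1 r2 : Int × Int × Int × Int) : Bool :=
  (decide (r2.1 ≤ r1.1) && decide (r1.1 ≤ r1.2.2.1) && decide (r1.2.2.1 ≤ r2.2.2.1)) &&
  (decide (r2.2.1 ≤ r1.2.1) && decide (r1.2.1 ≤ r1.2.2.2) && decide (r1.2.2.2 ≤ r2.2.2.2))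

-- rectangle_area(rect)
def pvAreaA (r : Int × Int × Int × Int) : Int := (r.2.2.1 - r.1) * (r.2.2.2 - r.2.1)

-- inner 'for rect_2 in rect_list' loop with its break (returns is_biggest_rect)
def pvInnerA (r1 : Int × Int × Int × Int) : List (Int × Int × Int × Int) → Bool
  | [] => true
  | r2 :: rest =>
    if r1 ≠ r2 ∧ (pvInsideA r2 r1 = true ∨ pvInsideA r1 r2 = true) then
      if pvAreaA r1 < pvAreaA r2 then false else pvInnerA r1 rest
    else pvInnerA r1 rest

def return_biggest_rectangle (rect_list : List (Int × Int × Int × Int)) (is_plate : Bool) : List (Int × Int × Int × Int) :=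
  rect_list.foldl (fun acc r1 =>
    if pvInnerA r1 rect_list then
      if is_plate = false then acc ++ [r1]
      else if is_plate = true ∧ pvAreaA r1 > 9000 then acc ++ [r1]
      else acc
    else acc) []

-- ===== PORT B =====
def pvAreaB (r : Int × Int × Int × Int) : Int := (r.2.2.1 - r.1) * (r.2.2.2 - r.2.1)

-- contains(big, small)
def pvContainsB (big small : Int × Int × Int × Int) : Bool :=
  (decide (big.1 ≤ small.1) && decide (small.1 ≤ small.2.2.1) && decide (small.2.2.1 ≤ big.2.2.1)) &&
  (decide (big.2.1 ≤ small.2.1) && decide (small.2.1 ≤ small.2.2.2) && decide (small.2.2.2 ≤ big.2.2.2))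

-- body of the 'for r in sorted(...)' loop
def pvKeptStep (ks : List (Int × Int × Int × Int)) (r : Int × Int × Int × Int) : List (Int × Int × Int × Int) :=
  if ks.any (fun k => pvContainsB k r && decide (pvAreaB k > pvAreaB r)) then ks else ks ++ [r]

def return_biggest_rectangle_alt (rect_list : List (Int × Int × Int × Int)) (is_plate : Bool) : List (Int × Int × Int × Int) :=
  let kept := (PySem.List.sorted rect_list pvAreaB true).foldl pvKeptStep []
  rect_list.filter (fun r => kept.contains r && (!is_plate || decide (pvAreaB r > 9000)))

-- ===== PRECONDITION & SPEC =====
def Spec_return_biggest_rectangle (rect_list : List (Int × Int × Int × Int)) (is_plate : Bool) (out : List (Int × Int × Int × Int)) : Prop := out = return_biggest_rectangle_alt rect_list is_plate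
instance (rect_list : List (Int × Int × Int × Int)) (is_plate : Bool) (out : List (Int × Int × Int × Int)) : Decidable (Spec_return_biggest_rectangle rect_list is_plate out) := by unfold Spec_return_biggest_rectangle; infer_instance

-- ===== CLAIM (what is proved, stated in full; the proofs are below) =====
def Claim_equal_return_biggest_rectangle : Prop := ∀ (rect_list : List (Int × Int × Int × Int)) (is_plate : Bool), Dom_return_biggest_rectangle rect_list is_plate → Spec_return_biggest_rectangle rect_list is_plate (return_biggest_rectangle rect_list is_plate)

-- ===== LEMMAS AND PROOFS =====

-- 'r is blocked within L': some rectangle of L strictly contains r with strictly larger area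
def pvBlocked (L : List (Int × Int × Int × Int)) (r : Int × Int × Int × Int) : Prop :=
  ∃ k ∈ L, pvContainsB k r = true ∧ pvAreaB r < pvAreaB k

lemma pvArea_mono {a b : Int × Int × Int × Int} (h : pvContainsB b a = true) : pvAreaB a ≤ pvAreaB b := by
  simp only [pvContainsB, Bool.and_eq_true, decide_eq_true_eq] at h
  obtain ⟨⟨⟨h1, h2⟩, h3⟩, ⟨h4, h5⟩, h6⟩ := h
  simp only [pvAreaB]
  nlinarith

lemma pvContains_trans {a b c : Int × Int × Int × Int} (h1 : pvContainsB a b = true) (h2 : pvContainsB b c = true) : pvContainsB a c = true := by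
  simp only [pvContainsB, Bool.and_eq_true, decide_eq_true_eq] at h1 h2 ⊢
  omega

lemma pvInside_eq_contains (r1 r2 : Int × Int × Int × Int) : pvInsideA r1 r2 = pvContainsB r2 r1 := rfl

lemma pvAreaA_eq (r : Int × Int × Int × Int) : pvAreaA r = pvAreaB r := rfl

-- A's inner-loop test is equivalent to strict containment with strictly larger area
lemma pvInner_cond (x r : Int × Int × Int × Int) :
    ((r ≠ x ∧ (pvInsideA x r = true ∨ pvInsideA r x = true)) ∧ pvAreaA r < pvAreaA x)
      ↔ (pvContainsB x r = true ∧ pvAreaB r < pvAreaB x) := by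
  rw [pvInside_eq_contains, pvInside_eq_contains, pvAreaA_eq, pvAreaA_eq]
  constructor
  · rintro ⟨⟨hne, h | h⟩, hlt⟩
    · exact absurd (pvArea_mono h) (not_le.mpr hlt)
    · exact ⟨h, hlt⟩
  · rintro ⟨hc, hlt⟩
    refine ⟨⟨?_, Or.inr hc⟩, hlt⟩
    rintro rfl; exact lt_irrefl _ hlt

lemma pvBlocked_cons (x : Int × Int × Int × Int) (xs : List (Int × Int × Int × Int)) (r : Int × Int × Int × Int) :
    pvBlocked (x :: xs) r ↔ (pvContainsB x r = true ∧ pvAreaB r < pvAreaB x) ∨ pvBlocked xs r := by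
  simp [pvBlocked]

lemma pvInnerA_iff (r : Int × Int × Int × Int) (L : List (Int × Int × Int × Int)) :
    pvInnerA r L = true ↔ ¬ pvBlocked L r := by
  induction L with
  | nil => simp [pvInnerA, pvBlocked]
  | cons x xs ih =>
    simp only [pvInnerA]
    by_cases hC : pvContainsB x r = true ∧ pvAreaB r < pvAreaB x
    · obtain ⟨hP, hQ⟩ := (pvInner_cond x r).mpr hC
      rw [if_pos hP, if_pos hQ]
      simp [pvBlocked_cons, hC]
    · have hL : (if r ≠ x ∧ (pvInsideA x r = true ∨ pvInsideA r x = true) then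
          if pvAreaA r < pvAreaA x then false else pvInnerA r xs else pvInnerA r xs) = pvInnerA r xs := by
        split_ifs with h1 h2
        · exact absurd ((pvInner_cond x r).mp ⟨h1, h2⟩) hC
        · rfl
        · rfl
      rw [hL, ih, pvBlocked_cons]
      tauto

lemma pvKeptStep_mono {acc : List (Int × Int × Int × Int)} {k : Int × Int × Int × Int}
    (s : Int × Int × Int × Int) (h : k ∈ acc) : k ∈ pvKeptStep acc s := by
  unfold pvKeptStep; split_ifs
  · exact h
  · exact List.mem_append_left _ h

lemma pvKeptStep_subset {acc : List (Int × Int × Int × Int)} {s k : Int × Int × Int × Int}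
    (h : k ∈ pvKeptStep acc s) : k ∈ acc ++ [s] := by
  unfold pvKeptStep at h; split_ifs at h
  · exact List.mem_append_left _ h
  · exact h

lemma pvKept_mono (S : List (Int × Int × Int × Int)) (acc : List (Int × Int × Int × Int))
    {r : Int × Int × Int × Int} (h : r ∈ acc) : r ∈ S.foldl pvKeptStep acc := by
  induction S generalizing acc with
  | nil => simpa using h
  | cons s S ih => exact ih _ (pvKeptStep_mono s h)

lemma pvKept_subset (S : List (Int × Int × Int × Int)) (acc : List (Int × Int × Int × Int))
    {r : Int × Int × Int × Int} (h : r ∈ S.foldl pvKeptStep acc) : r ∈ acc ∨ r ∈ S := by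
  induction S generalizing acc with
  | nil => exact Or.inl (by simpa using h)
  | cons s S ih =>
    simp only [List.foldl_cons] at h
    rcases ih _ h with h1 | h1
    · rcases List.mem_append.mp (pvKeptStep_subset h1) with h2 | h2
      · exact Or.inl h2
      · right; simp only [List.mem_singleton] at h2; simp [h2]
    · exact Or.inr (List.mem_cons_of_mem _ h1)

lemma pvKept_of_max (S : List (Int × Int × Int × Int)) (acc : List (Int × Int × Int × Int))
    {r : Int × Int × Int × Int} (hr : r ∈ S) (hmax : ¬ pvBlocked (acc ++ S) r) :
    r ∈ S.foldl pvKeptStep acc := by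
  induction S generalizing acc with
  | nil => cases hr
  | cons s S ih =>
    simp only [List.foldl_cons]
    by_cases he : r = s
    · subst he
      have hstep : pvKeptStep acc r = acc ++ [r] := by
        unfold pvKeptStep
        rw [if_neg]
        intro hany
        rcases List.any_eq_true.mp hany with ⟨k, hk, hkp⟩
        simp only [Bool.and_eq_true, decide_eq_true_eq] at hkp
        exact hmax ⟨k, List.mem_append_left _ hk, hkp.1, hkp.2⟩
      rw [hstep]
      exact pvKept_mono _ _ (by simp)
    · have hr' : r ∈ S := by
        rcases List.mem_cons.mp hr with h | h
        · exact absurd h he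
        · exact h
      refine ih _ hr' ?_
      rintro ⟨k, hk, hkk⟩
      apply hmax
      refine ⟨k, ?_, hkk⟩
      rcases List.mem_append.mp hk with h | h
      · rcases List.mem_append.mp (pvKeptStep_subset h) with h2 | h2
        · exact List.mem_append_left _ h2
        · simp only [List.mem_singleton] at h2; subst h2; simp
      · exact List.mem_append_right _ (List.mem_cons_of_mem _ h)

lemma pvKept_drop (S : List (Int × Int × Int × Int)) (acc : List (Int × Int × Int × Int))
    (hsort : S.Pairwise (fun a b => pvAreaB b ≤ pvAreaB a))
    {rb r : Int × Int × Int × Int}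
    (hrb : rb ∈ acc ++ S) (hrbmax : ¬ pvBlocked (acc ++ S) rb)
    (hc : pvContainsB rb r = true) (ha : pvAreaB r < pvAreaB rb)
    (hnacc : r ∉ acc) : r ∉ S.foldl pvKeptStep acc := by
  induction S generalizing acc with
  | nil => simpa using hnacc
  | cons s S ih =>
    obtain ⟨hs_head, hsort'⟩ := List.pairwise_cons.mp hsort
    simp only [List.foldl_cons]
    -- rb survives the step: either it was already in acc, or rb = s gets appended, or rb ∈ S
    have hnotblocked_acc : ∀ x, x ∈ acc ++ s :: S → ¬ pvBlocked (acc ++ s :: S) x →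
        (List.any acc (fun k => pvContainsB k x && decide (pvAreaB x < pvAreaB k)) = true → False) := by
      intro x _ hnb hany
      rcases List.any_eq_true.mp hany with ⟨k, hk, hkp⟩
      simp only [Bool.and_eq_true, decide_eq_true_eq] at hkp
      exact hnb ⟨k, List.mem_append_left _ hk, hkp.1, hkp.2⟩
    have hrb' : rb ∈ pvKeptStep acc s ++ S := by
      rcases List.mem_append.mp hrb with h | h
      · exact List.mem_append_left _ (pvKeptStep_mono s h)
      · rcases List.mem_cons.mp h with h2 | h2
        · subst h2
          have : pvKeptStep acc rb = acc ++ [rb] := by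
            unfold pvKeptStep
            rw [if_neg]
            intro hany
            exact hnotblocked_acc rb hrb hrbmax hany
          rw [this] at *
          exact List.mem_append_left _ (by simp)
        · exact List.mem_append_right _ h2
    have hsubstep : ∀ x, x ∈ pvKeptStep acc s ++ S → x ∈ acc ++ s :: S := by
      intro x hx
      rcases List.mem_append.mp hx with h | h
      · rcases List.mem_append.mp (pvKeptStep_subset h) with h2 | h2
        · exact List.mem_append_left _ h2
        · simp only [List.mem_singleton] at h2; subst h2; simp
      · exact List.mem_append_right _ (List.mem_cons_of_mem _ h)
    have hrbmax' : ¬ pvBlocked (pvKeptStep acc s ++ S) rb := by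
      rintro ⟨k, hk, hkk⟩
      exact hrbmax ⟨k, hsubstep k hk, hkk⟩
    have hnacc' : r ∉ pvKeptStep acc s := by
      intro hrk
      rcases List.mem_append.mp (pvKeptStep_subset hrk) with h2 | h2
      · exact hnacc h2
      · -- r = s: then the blocking check on s must have fired, so pvKeptStep acc s = acc
        simp only [List.mem_singleton] at h2
        subst h2
        -- rb blocks r = s, so rb must be in acc (rb cannot be s nor come later in S)
        have hrb_acc : rb ∈ acc := by
          rcases List.mem_append.mp hrb with h | h
          · exact h
          · rcases List.mem_cons.mp h with h3 | h3
            · subst h3; exact absurd ha (lt_irrefl _)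
            · exact absurd ha (not_lt.mpr (hs_head rb h3))
        have : pvKeptStep acc r = acc := by
          unfold pvKeptStep
          rw [if_pos]
          exact List.any_eq_true.mpr ⟨rb, hrb_acc, by simp [hc, ha]⟩
        rw [this] at hrk
        exact hnacc hrk
    exact ih _ hsort' hrb' hrbmax' hnacc'

lemma pvBlocked_max (L : List (Int × Int × Int × Int)) {r : Int × Int × Int × Int}
    (h : pvBlocked L r) :
    ∃ rb ∈ L, pvContainsB rb r = true ∧ pvAreaB r < pvAreaB rb ∧ ¬ pvBlocked L rb := by
  obtain ⟨k0, hk0L, hk0c, hk0a⟩ := h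
  set C := L.filter (fun k => pvContainsB k r && decide (pvAreaB r < pvAreaB k)) with hCdef
  have hk0C : k0 ∈ C := List.mem_filter.mpr ⟨hk0L, by simp [hk0c, hk0a]⟩
  have hCne : C.argmax pvAreaB ≠ none := by
    intro hnone
    rw [List.argmax_eq_none] at hnone
    rw [hnone] at hk0C
    cases hk0C
  obtain ⟨m, hm⟩ := Option.ne_none_iff_exists'.mp hCne
  have hmC : m ∈ C := List.argmax_mem hm
  have hmax' : ∀ a ∈ C, pvAreaB a ≤ pvAreaB m := fun a ha => List.le_of_mem_argmax ha hm
  obtain ⟨hmL, hmp⟩ := List.mem_filter.mp hmC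
  simp only [Bool.and_eq_true, decide_eq_true_eq] at hmp
  refine ⟨m, hmL, hmp.1, hmp.2, ?_⟩
  rintro ⟨k, hkL, hkc, hka⟩
  have hkC : k ∈ C := List.mem_filter.mpr
    ⟨hkL, by simp [pvContains_trans hkc hmp.1, lt_trans hmp.2 hka]⟩
  exact absurd (hmax' k hkC) (not_le.mpr hka)

lemma pvMem_kept_iff (L : List (Int × Int × Int × Int)) (r : Int × Int × Int × Int) :
    r ∈ (PySem.List.sorted L pvAreaB true).foldl pvKeptStep [] ↔ r ∈ L ∧ ¬ pvBlocked L r := by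
  have hperm := PySem.List.sorted_perm L pvAreaB true
  have hmemS : ∀ x, x ∈ PySem.List.sorted L pvAreaB true ↔ x ∈ L := fun x => hperm.mem_iff
  have hBlockedS : ∀ x, pvBlocked (PySem.List.sorted L pvAreaB true) x ↔ pvBlocked L x := by
    intro x
    constructor <;> rintro ⟨k, hk, hkk⟩
    · exact ⟨k, (hmemS k).mp hk, hkk⟩
    · exact ⟨k, (hmemS k).mpr hk, hkk⟩
  constructor
  · intro hk
    have hrS : r ∈ PySem.List.sorted L pvAreaB true :=
      (pvKept_subset _ _ hk).resolve_left (by simp)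
    refine ⟨(hmemS r).mp hrS, ?_⟩
    intro hB
    obtain ⟨rb, hrbL, hrbc, hrba, hrbmax⟩ := pvBlocked_max L hB
    exact pvKept_drop _ [] (PySem.List.sorted_pairwise_rev L pvAreaB)
      (by simpa using (hmemS rb).mpr hrbL)
      (by simpa [hBlockedS rb] using hrbmax) hrbc hrba (by simp) hk
  · rintro ⟨hrL, hnB⟩
    exact pvKept_of_max _ [] ((hmemS r).mpr hrL) (by simpa [hBlockedS r] using hnB)

-- ===== VERDICT (by name: the statement is the Claim_ definition above) =====
theorem return_biggest_rectangle_spec : Claim_equal_return_biggest_rectangle := by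
  intro L p _
  show return_biggest_rectangle L p = return_biggest_rectangle_alt L p
  unfold return_biggest_rectangle return_biggest_rectangle_alt
  have hstep : (fun (acc : List (Int × Int × Int × Int)) r1 =>
      if pvInnerA r1 L = true then
        if p = false then acc ++ [r1]
        else if p = true ∧ pvAreaA r1 > 9000 then acc ++ [r1]
        else acc
      else acc)
      = fun acc r1 => if (pvInnerA r1 L && (!p || decide (pvAreaB r1 > 9000))) = true then acc ++ [r1] else acc := by
    funext acc r1
    rw [← pvAreaA_eq]
    cases p <;> by_cases h : pvInnerA r1 L = true <;>
      by_cases h2 : pvAreaA r1 > 9000 <;> simp [h, h2]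
  rw [hstep]
  have := PySem.List.foldl_append_if
    (fun r1 => pvInnerA r1 L && (!p || decide (pvAreaB r1 > 9000))) (fun x => x) L ([] : List (Int × Int × Int × Int))
  simp only [List.map_id'] at this
  rw [this]
  simp only [List.nil_append]
  apply List.filter_congr
  intro r hr
  have h1 : pvInnerA r L = ((PySem.List.sorted L pvAreaB true).foldl pvKeptStep []).contains r := by
    rw [Bool.eq_iff_iff, pvInnerA_iff, List.contains_iff_mem, pvMem_kept_iff]
    exact ⟨fun h => ⟨hr, h⟩, fun h => h.2⟩
  rw [h1]
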